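-- pv_equiv track=rewrite | github.com/Shadowfang116/CDS | backend/scripts/repair_corruption.py | replace_backslash_n_outside_strings
-- ===== SOURCE A (Python) =====
-- def replace_backslash_n_outside_strings(text: str) -> str:
--     out = []
--     i = 0
--     n = len(text)
--     in_str = False
--     quote = ''
--     triple = False
--     while i < n:
--         ch = text[i]
--         if not in_str:
--             if ch == '"' or ch == "'":
--                 q3 = text[i:i+3]
--                 if q3 in ("'''", '"""'):
--                     in_str = True
--                     quote = q3
--                     triple = True
--                     out.append(q3)
--                     i += 3
--                     continue
--                 else:
--                     in_str = True
--                     quote = ch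
--                     triple = False
--                     out.append(ch)
--                     i += 1
--                     continue
--             if ch == '\\' and (i + 1) < n and text[i + 1] == 'n':
--                 out.append('\n')
--                 i += 2
--                 while i < n and text[i] in (' ', '\t'):
--                     out.append(text[i])
--                     i += 1
--                 continue
--             else:
--                 out.append(ch)
--                 i += 1
--                 continue
--         else:
--             if triple:
--                 if text[i:i+3] == quote:
--                     out.append(quote)
--                     i += 3
--                     in_str = False
--                     quote = ''
--                     triple = False
--                 else:
--                     out.append(ch)
--                     i += 1
--             else:
--                 if ch == '\\':
--                     out.append(ch)
--                     if i + 1 < n: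
--                         out.append(text[i + 1])
--                         i += 2
--                     else:
--                         i += 1
--                 elif ch == quote:
--                     out.append(ch)
--                     i += 1
--                     in_str = False
--                     quote = ''
--                 else:
--                     out.append(ch)
--                     i += 1
--     return ''.join(out)
-- ===== SOURCE B (Python) =====
-- def replace_backslash_n_outside_strings(text: str) -> str:
--     # Pass 1: classify each index as inside/outside a string literal.
--     n = len(text)
--     inside = []
--     in_str = False
--     quote = ''
--     triple = False
--     i = 0
--     while i < n:
--         ch = text[i]
--         if not in_str:
--             if ch == '"' or ch == "'":
--                 q3 = text[i:i+3]
--                 if q3 in ("'''", '"""'):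
--                     in_str, quote, triple = True, q3, True
--                     inside += [True, True, True]
--                     i += 3
--                 else:
--                     in_str, quote, triple = True, ch, False
--                     inside.append(True)
--                     i += 1
--             else:
--                 inside.append(False)
--                 i += 1
--         elif triple:
--             if text[i:i+3] == quote:
--                 inside += [True, True, True]
--                 in_str, quote, triple = False, '', False
--                 i += 3
--             else:
--                 inside.append(True)
--                 i += 1
--         else:
--             if ch == '\\':
--                 if i + 1 < n:
--                     inside += [True, True]
--                     i += 2
--                 else:
--                     inside.append(True)
--                     i += 1
--             elif ch == quote:
--                 inside.append(True)
--                 in_str, quote = False, ''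
--                 i += 1
--             else:
--                 inside.append(True)
--                 i += 1
--     # Pass 2: replace '\\n' by a newline wherever it starts outside a literal.
--     out = []
--     i = 0
--     while i < n:
--         if not inside[i] and text[i] == '\\' and i + 1 < n and text[i + 1] == 'n':
--             out.append('\n')
--             i += 2
--         else:
--             out.append(text[i])
--             i += 1
--     return ''.join(out)
-- ===== Notes on version B (the rewrite author's own statement) =====
-- stated objective: alternative
-- what changed: A's single fused scan (string-literal state machine + replacement + a redundant whitespace-copy loop after each replacement) is split into two separate passes: pass 1 only classifies each index as inside/outside a string literal, pass 2 does the \n replacement using the mask alone with no string state and no whitespace loop.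
import Mathlib
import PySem

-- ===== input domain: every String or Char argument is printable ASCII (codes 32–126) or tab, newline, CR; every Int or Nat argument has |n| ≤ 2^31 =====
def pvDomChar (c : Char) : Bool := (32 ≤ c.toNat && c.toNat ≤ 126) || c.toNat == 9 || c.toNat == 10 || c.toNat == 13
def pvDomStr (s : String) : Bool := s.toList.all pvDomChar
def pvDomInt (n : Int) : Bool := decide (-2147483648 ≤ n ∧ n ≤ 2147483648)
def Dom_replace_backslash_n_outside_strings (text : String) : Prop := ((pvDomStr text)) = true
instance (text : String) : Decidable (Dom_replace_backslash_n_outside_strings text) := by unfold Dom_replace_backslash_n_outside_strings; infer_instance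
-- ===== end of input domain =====

-- B replaces A's fused single pass by two passes: a classification pass marking which
-- indices lie inside string literals, then a replacement pass with no string state
-- (objective: alternative decomposition; same cost, A's redundant whitespace-copy loop dropped).

-- ===== PORT A =====
-- inner `while i < n and text[i] in (' ', '\t')` copy loop of A: returns (new i, copied chars)
def pvWsLoop (s : List Char) (i : Nat) : Nat × List Char :=
  if h : i < s.length ∧ (s.getD i ' ' = ' ' ∨ s.getD i ' ' = '\t') then
    let r := pvWsLoop s (i + 1)
    (r.1, s.getD i ' ' :: r.2)
  else (i, [])
termination_by s.length - i
decreasing_by omega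

theorem pvWsLoop_ge (s : List Char) (i : Nat) : i ≤ (pvWsLoop s i).1 := by
  rw [pvWsLoop]
  split
  · have h := pvWsLoop_ge s (i + 1)
    simpa using Nat.le_trans (Nat.le_succ i) h
  · simp
termination_by s.length - i
decreasing_by omega

-- A's main `while i < n` loop; `out.append`s become conses in front of the recursive call
def pvLoopA (s : List Char) (i : Nat) (in_str : Bool) (quote : List Char) (triple : Bool) :
    List Char :=
  if h : i < s.length then
    let ch := s.getD i ' '
    if in_str = false then
      if ch = '"' ∨ ch = '\'' then
        let q3 := (s.drop i).take 3          -- text[i:i+3]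
        if q3 = ['\'', '\'', '\''] ∨ q3 = ['"', '"', '"'] then
          q3 ++ pvLoopA s (i + 3) true q3 true
        else
          ch :: pvLoopA s (i + 1) true [ch] false
      else if ch = '\\' ∧ i + 1 < s.length ∧ s.getD (i + 1) ' ' = 'n' then
        let r := pvWsLoop s (i + 2)
        '\n' :: (r.2 ++ pvLoopA s r.1 in_str quote triple)
      else
        ch :: pvLoopA s (i + 1) in_str quote triple
    else
      if triple = true then
        if (s.drop i).take 3 = quote then
          quote ++ pvLoopA s (i + 3) false [] false
        else
          ch :: pvLoopA s (i + 1) in_str quote triple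
      else
        if ch = '\\' then
          if i + 1 < s.length then
            ch :: s.getD (i + 1) ' ' :: pvLoopA s (i + 2) in_str quote triple
          else
            ch :: pvLoopA s (i + 1) in_str quote triple
        else if [ch] = quote then
          ch :: pvLoopA s (i + 1) false [] triple
        else
          ch :: pvLoopA s (i + 1) in_str quote triple
  else []
termination_by s.length - i
decreasing_by
  all_goals first
    | omega
    | (have := pvWsLoop_ge s (i + 2); omega)

def replace_backslash_n_outside_strings (text : String) : String :=
  String.mk (pvLoopA text.toList 0 false [] false)

-- ===== PORT B =====
-- pass 1 of Source B: the booleans appended to `inside`, in order, from position i on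
def pvPass1 (s : List Char) (i : Nat) (in_str : Bool) (quote : List Char) (triple : Bool) :
    List Bool :=
  if h : i < s.length then
    let ch := s.getD i ' '
    if in_str = false then
      if ch = '"' ∨ ch = '\'' then
        let q3 := (s.drop i).take 3
        if q3 = ['\'', '\'', '\''] ∨ q3 = ['"', '"', '"'] then
          true :: true :: true :: pvPass1 s (i + 3) true q3 true
        else
          true :: pvPass1 s (i + 1) true [ch] false
      else
        false :: pvPass1 s (i + 1) in_str quote triple
    else
      if triple = true then
        if (s.drop i).take 3 = quote then
          true :: true :: true :: pvPass1 s (i + 3) false [] false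
        else
          true :: pvPass1 s (i + 1) in_str quote triple
      else
        if ch = '\\' then
          if i + 1 < s.length then
            true :: true :: pvPass1 s (i + 2) in_str quote triple
          else
            true :: pvPass1 s (i + 1) in_str quote triple
        else if [ch] = quote then
          true :: pvPass1 s (i + 1) false [] triple
        else
          true :: pvPass1 s (i + 1) in_str quote triple
  else []
termination_by s.length - i
decreasing_by all_goals omega

-- pass 2 of Source B: replacement using only the `inside` mask
def pvPass2 (s : List Char) (m : List Bool) (i : Nat) : List Char :=
  if h : i < s.length then
    if m.getD i true = false ∧ s.getD i ' ' = '\\' ∧ i + 1 < s.length ∧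
        s.getD (i + 1) ' ' = 'n' then
      '\n' :: pvPass2 s m (i + 2)
    else
      s.getD i ' ' :: pvPass2 s m (i + 1)
  else []
termination_by s.length - i
decreasing_by all_goals omega

def replace_backslash_n_outside_strings_alt (text : String) : String :=
  let s := text.toList
  String.mk (pvPass2 s (pvPass1 s 0 false [] false) 0)

-- ===== PRECONDITION & SPEC =====
def Spec_replace_backslash_n_outside_strings (text : String) (out : String) : Prop := out = replace_backslash_n_outside_strings_alt text
instance (text : String) (out : String) : Decidable (Spec_replace_backslash_n_outside_strings text out) := by unfold Spec_replace_backslash_n_outside_strings; infer_instance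

-- ===== CLAIM (what is proved, stated in full; the proofs are below) =====
def Claim_equal_replace_backslash_n_outside_strings : Prop := ∀ (text : String), Dom_replace_backslash_n_outside_strings text → Spec_replace_backslash_n_outside_strings text (replace_backslash_n_outside_strings text)

-- ===== LEMMAS AND PROOFS =====

theorem pv_drop_cons {α : Type} {m : List α} {i : Nat} {b : α} {t : List α} (d : α)
    (h : m.drop i = b :: t) : m.getD i d = b ∧ m.drop (i + 1) = t := by
  constructor
  · have h0 : m[i]? = (m.drop i)[0]? := by simp
    rw [List.getD_eq_getElem?_getD, h0, h]; rfl
  · have : m.drop (i + 1) = (m.drop i).drop 1 := by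
      rw [List.drop_drop]
    rw [this, h]; rfl

theorem pv_take3 {s : List Char} {i : Nat} {a b c : Char}
    (h : (s.drop i).take 3 = [a, b, c]) :
    i + 3 ≤ s.length ∧ s.getD i ' ' = a ∧ s.getD (i + 1) ' ' = b ∧ s.getD (i + 2) ' ' = c := by
  have hlen : i + 3 ≤ s.length := by
    have := congrArg List.length h
    simp [List.length_take, List.length_drop] at this
    omega
  have hd : s.drop i = a :: b :: c :: ((s.drop i).drop 3) := by
    conv_lhs => rw [← List.take_append_drop 3 (s.drop i)]
    rw [h]; rfl
  obtain ⟨h0, h1⟩ := pv_drop_cons ' ' hd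
  obtain ⟨h1', h2⟩ := pv_drop_cons ' ' h1
  obtain ⟨h2', _⟩ := pv_drop_cons ' ' h2
  exact ⟨hlen, h0, h1', h2'⟩

-- pass-2 step lemmas
theorem pvPass2_copy {s : List Char} {m : List Bool} {i : Nat}
    (hi : i < s.length) (hm : m.getD i true = true) :
    pvPass2 s m i = s.getD i ' ' :: pvPass2 s m (i + 1) := by
  rw [pvPass2, dif_pos hi, if_neg]
  rintro ⟨h0, -⟩
  rw [hm] at h0
  exact absurd h0 (by decide)

theorem pvPass2_copy2 {s : List Char} {m : List Bool} {i : Nat}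
    (hi : i + 1 < s.length) (h0 : m.getD i true = true) (h1 : m.getD (i + 1) true = true) :
    pvPass2 s m i = s.getD i ' ' :: s.getD (i + 1) ' ' :: pvPass2 s m (i + 2) := by
  rw [pvPass2_copy (by omega) h0, pvPass2_copy hi h1]

theorem pvPass2_copy3 {s : List Char} {m : List Bool} {i : Nat}
    (hi : i + 3 ≤ s.length) (h0 : m.getD i true = true) (h1 : m.getD (i + 1) true = true)
    (h2 : m.getD (i + 2) true = true) :
    pvPass2 s m i =
      s.getD i ' ' :: s.getD (i + 1) ' ' :: s.getD (i + 2) ' ' :: pvPass2 s m (i + 3) := by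
  rw [pvPass2_copy (by omega) h0, pvPass2_copy (by omega) h1, pvPass2_copy (by omega) h2]

-- the whitespace-copy loop of A is plain copying for pass 2 as well
theorem pv_ws_sim (s : List Char) (m : List Bool) (quote : List Char) (triple : Bool) :
    ∀ N i, s.length - i ≤ N →
      m.drop i = pvPass1 s i false quote triple →
      m.drop (pvWsLoop s i).1 = pvPass1 s (pvWsLoop s i).1 false quote triple ∧
      pvPass2 s m i = (pvWsLoop s i).2 ++ pvPass2 s m (pvWsLoop s i).1 := by
  intro N
  induction N with
  | zero =>
    intro i hN hm
    have hi : ¬ i < s.length := by omega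
    rw [pvWsLoop]
    simp [hi, hm]
  | succ N ih =>
    intro i hN hm
    by_cases hw : i < s.length ∧ (s.getD i ' ' = ' ' ∨ s.getD i ' ' = '\t')
    · obtain ⟨hi, hsp⟩ := hw
      have hq : ¬ (s.getD i ' ' = '"' ∨ s.getD i ' ' = '\'') := by
        rcases hsp with h | h <;> rw [h] <;> decide
      rw [pvPass1] at hm
      simp only [hi, ↓reduceDIte] at hm
      rw [if_pos trivial, if_neg hq] at hm
      obtain ⟨hm0, hm1⟩ := pv_drop_cons true hm
      have h2 : pvPass2 s m i = s.getD i ' ' :: pvPass2 s m (i + 1) := by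
        rw [pvPass2, dif_pos hi, if_neg]
        rintro ⟨-, hb, -⟩
        rcases hsp with h | h <;> rw [h] at hb <;> exact absurd hb (by decide)
      obtain ⟨ihA, ihB⟩ := ih (i + 1) (by omega) hm1
      rw [pvWsLoop]
      simp only [hi, hsp, and_self, true_and, dif_pos]
      refine ⟨ihA, ?_⟩
      rw [h2, ihB]
      rfl
    · rw [pvWsLoop]
      simp only [hw, dif_neg, not_false_iff]
      exact ⟨hm, by simp⟩

-- main simulation: A's fused loop from any state equals B's pass 2, given that the mask
-- from position i on is what pass 1 produces from the same state
theorem pv_sim (s : List Char) (m : List Bool) :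
    ∀ N i in_str quote triple, s.length - i ≤ N →
      (triple = true → quote.length = 3) →
      m.drop i = pvPass1 s i in_str quote triple →
      pvLoopA s i in_str quote triple = pvPass2 s m i := by
  intro N
  induction N with
  | zero =>
    intro i in_str quote triple hN _ _
    have hi : ¬ i < s.length := by omega
    rw [pvLoopA, pvPass2]
    simp [hi]
  | succ N ih =>
    intro i in_str quote triple hN htr hm
    by_cases hi : i < s.length
    case neg => rw [pvLoopA, pvPass2]; simp [hi]
    rw [pvLoopA]
    rw [pvPass1] at hm
    simp only [hi, ↓reduceDIte] at hm ⊢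
    cases in_str with
    | false =>
      rw [if_pos rfl] at hm ⊢
      by_cases hq : s.getD i ' ' = '"' ∨ s.getD i ' ' = '\''
      · rw [if_pos hq] at hm ⊢
        by_cases h3 : (s.drop i).take 3 = ['\'', '\'', '\''] ∨
            (s.drop i).take 3 = ['"', '"', '"']
        · -- opening triple quote: three marked copies, then inside-triple state
          rw [if_pos h3] at hm ⊢
          rcases h3 with h | h <;>
          · rw [h] at hm ⊢
            obtain ⟨hm0, hm1⟩ := pv_drop_cons true hm
            obtain ⟨hm1', hm2⟩ := pv_drop_cons true hm1
            obtain ⟨hm2', hm3⟩ := pv_drop_cons true hm2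
            obtain ⟨h3le, ha, hb, hc⟩ := pv_take3 h
            rw [pvPass2_copy3 h3le hm0 hm1' hm2', ha, hb, hc,
              ih (i + 3) true _ true (by omega) (fun _ => rfl) hm3]
            rfl
        · -- opening single quote
          rw [if_neg h3] at hm ⊢
          obtain ⟨hm0, hm1⟩ := pv_drop_cons true hm
          rw [pvPass2_copy hi hm0,
            ih (i + 1) true [s.getD i ' '] false (by omega) (by simp) hm1]
      · rw [if_neg hq] at hm ⊢
        obtain ⟨hm0, hm1⟩ := pv_drop_cons true hm
        by_cases hbn : s.getD i ' ' = '\\' ∧ i + 1 < s.length ∧ s.getD (i + 1) ' ' = 'n'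
        · -- the replacement '\n' -> newline, then A's whitespace-copy loop
          rw [if_pos hbn]
          have hq1 : ¬ (s.getD (i + 1) ' ' = '"' ∨ s.getD (i + 1) ' ' = '\'') := by
            rw [hbn.2.2]; decide
          rw [pvPass1] at hm1
          simp only [hbn.2.1, ↓reduceDIte] at hm1
          rw [if_pos trivial, if_neg hq1] at hm1
          obtain ⟨hm1', hm2⟩ := pv_drop_cons true hm1
          have h2 : pvPass2 s m i = '\n' :: pvPass2 s m (i + 2) := by
            rw [pvPass2, dif_pos hi, if_pos ⟨hm0, hbn.1, hbn.2.1, hbn.2.2⟩]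
          obtain ⟨hwA, hwB⟩ := pv_ws_sim s m quote triple (s.length - (i + 2)) (i + 2)
            (by omega) hm2
          have hge := pvWsLoop_ge s (i + 2)
          rw [h2, hwB,
            ih (pvWsLoop s (i + 2)).1 false quote triple (by omega) htr hwA]
        · -- ordinary copy outside strings
          rw [if_neg hbn]
          have h2 : pvPass2 s m i = s.getD i ' ' :: pvPass2 s m (i + 1) := by
            rw [pvPass2, dif_pos hi, if_neg]
            rintro ⟨-, hc1, hc2, hc3⟩
            exact hbn ⟨hc1, hc2, hc3⟩
          rw [h2, ih (i + 1) false quote triple (by omega) htr hm1]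
    | true =>
      rw [if_neg (by decide)] at hm ⊢
      cases triple with
      | true =>
        rw [if_pos rfl] at hm ⊢
        by_cases hc : (s.drop i).take 3 = quote
        · -- closing triple quote
          rw [if_pos hc] at hm ⊢
          obtain ⟨a, b, c, rfl⟩ : ∃ a b c, quote = [a, b, c] := by
            have h3 := htr rfl
            match quote, h3 with
            | [a, b, c], _ => exact ⟨a, b, c, rfl⟩
          obtain ⟨hm0, hm1⟩ := pv_drop_cons true hm
          obtain ⟨hm1', hm2⟩ := pv_drop_cons true hm1
          obtain ⟨hm2', hm3⟩ := pv_drop_cons true hm2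
          obtain ⟨h3le, ha, hb, hcc⟩ := pv_take3 hc
          rw [pvPass2_copy3 h3le hm0 hm1' hm2', ha, hb, hcc,
            ih (i + 3) false [] false (by omega) (by simp) hm3]
          rfl
        · -- inside a triple-quoted literal: copy
          rw [if_neg hc] at hm ⊢
          obtain ⟨hm0, hm1⟩ := pv_drop_cons true hm
          rw [pvPass2_copy hi hm0,
            ih (i + 1) true quote true (by omega) htr hm1]
      | false =>
        rw [if_neg (by decide)] at hm ⊢
        by_cases hb : s.getD i ' ' = '\\'
        · rw [if_pos hb] at hm ⊢
          by_cases h1 : i + 1 < s.length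
          · -- escape inside a single-quoted literal: copy two characters
            rw [if_pos h1] at hm ⊢
            obtain ⟨hm0, hm1⟩ := pv_drop_cons true hm
            obtain ⟨hm1', hm2⟩ := pv_drop_cons true hm1
            rw [pvPass2_copy2 h1 hm0 hm1',
              ih (i + 2) true quote false (by omega) (by simp) hm2]
          · rw [if_neg h1] at hm ⊢
            obtain ⟨hm0, hm1⟩ := pv_drop_cons true hm
            rw [pvPass2_copy hi hm0,
              ih (i + 1) true quote false (by omega) (by simp) hm1]
        · rw [if_neg hb] at hm ⊢
          by_cases hcq : [s.getD i ' '] = quote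
          · -- closing single quote
            rw [if_pos hcq] at hm ⊢
            obtain ⟨hm0, hm1⟩ := pv_drop_cons true hm
            rw [pvPass2_copy hi hm0,
              ih (i + 1) false [] false (by omega) (by simp) hm1]
          · rw [if_neg hcq] at hm ⊢
            obtain ⟨hm0, hm1⟩ := pv_drop_cons true hm
            rw [pvPass2_copy hi hm0,
              ih (i + 1) true quote false (by omega) (by simp) hm1]

-- ===== VERDICT (by name: the statement is the Claim_ definition above) =====
theorem replace_backslash_n_outside_strings_spec : Claim_equal_replace_backslash_n_outside_strings := by
  intro text _
  unfold Spec_replace_backslash_n_outside_strings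
  unfold replace_backslash_n_outside_strings replace_backslash_n_outside_strings_alt
  exact congrArg String.mk
    (pv_sim text.toList (pvPass1 text.toList 0 false [] false)
      text.toList.length 0 false [] false (by omega) (by simp) (by simp))
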